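/- PORTED by tools/port_fixed.py from Prog/Jsmn/D/Run.lean to THE FIXED IMAGE fixed/jsmn_d.bin (same bytes at the same addresses; binFD). Do not edit: edit the original and port again. -/
/-
  jsmn_d.bin: `jsmn_run` (65 bytes at 10056AH, 23 instructions, two calls): `jsmn_parser p; jsmn_init(&p); return jsmn_parse(&p, js, len,
  tokens, num_tokens)`. The parser struct lives in jsmn_run's own frame (`&p = rsp0 - 44`). The callees are used through their contracts.
-/
import Prog.Jsmn.Fixed.Specs
import Prog.Jsmn.Fixed.RunSpecs
import Prog.Jsmn.RunLemmas
import Prog.Jsmn.Fixed.CodeFD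

namespace X86
namespace J6
namespace FD
open X86.User (CodeAt RegsKept Span FlagsOK Layout toNat_add_ofNat toNat_ofNat_lt' add_ofNat_add)
open Jsmn JsmnFDBytes

set_option maxRecDepth 100000
set_option maxHeartbeats 4000000
set_option linter.unusedSimpArgs false
set_option linter.unusedVariables false

/-- The fields of `binFD` in a goal (the callees' preconditions are stated with them), and the registers of the view at the call. -/
macro "run_lit_f" : tactic => `(tactic| simp (implicitDefEqProofs := false) only [binFD_useRun, binFD_useParse, binFD_cfg, binFD_image,
  JsmnFDBytes.image_bytes_length, X86.User.State.reg_setReg, X86.User.State.reg_setRip, X86.User.State.reg_setFlags, X86.User.State.reg_setMem, reduceCtorEq,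
  if_true, if_false])

variable {n : User.Layout} {v0 : User.State} {ret jsA tb : Word} {js : List UInt8} {numTokens : Nat} {toks toks' : Option Tokens} {fuel : Nat} {r : Int}
  {p' : Parser}

theorem run_reach (hinit : InitSpec binFD n) (hparse : ParseSpecFixed binFD n)
    (hp : RunPreFixed binFD n v0 ret jsA tb js numTokens toks)
    (hm : parseFixed binFD.cfg js Parser.init toks numTokens = some (r, p', toks')) :
    Reach n v0 (fun v => CallPost v0 binFD.useRun [(tb.toNat, tb.toNat + toksBytes binFD.cfg numTokens toks)] ret v ∧ RetInt v r ∧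
      ToksArg binFD.cfg v.mem tb numTokens toks') := by
  have hW := hp.toksW
  have hnt : numTokens < 2 ^ 32 := hp.nlt
  have htoksR := hp.toksR
  have htoksArg := hp.toksArg
  v3_open hp hW
  clear hp_toksR
  j6f_bin
  have hcode := JsmnFD.tjfd_jsmn_run_code hp_call_img
  v3_walk hcode hp.call.fetch []
  refine Reach.trans (hinit _ 0x1005e9 (v0.reg .rsp - 44) ?pre) ?_
  case pre =>
    exact ⟨show CallPre n 0x100000 image_bytes 0x1005b4 0 0x1005e9 _ by v3_callpre hp_call_img hp.call, by v3_regnorm,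
      ⟨by v3_omega, by v3_omega, by run_lit_f; v3_omega, by run_lit_f; v3_omega⟩⟩
  intro v2 hpostI
  obtain ⟨hpostI1, hparser2⟩ := hpostI
  v3_open hpostI1
  have hkI := hpostI1.kept
  v3_viewnorm at hpostI1_rsp hpostI1_same hpostI1_rip
  have hsp44 : (v0.reg .rsp - 44).toNat = (v0.reg .rsp).toNat - 44 := by v3_omega
  have hsp56 : (v0.reg .rsp - 56).toNat = (v0.reg .rsp).toNat - 56 := by v3_omega
  rw [hsp44, hsp56] at hpostI1_same
  have himg2 : CodeAt v2.mem 0x100000 image_bytes := by v3_frame hp_call_img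
  have hcode2 := JsmnFD.tjfd_jsmn_run_code himg2
  clear hcodeW
  have hrbx : v2.reg .rbx = jsA := by rw [hkI.get .rbx rfl]; v3_regnorm
  have hrbp : v2.reg .rbp = UInt64.ofNat js.length := by rw [hkI.get .rbp rfl]; v3_regnorm
  have hr12 : v2.reg .r12 = tb := by rw [hkI.get .r12 rfl]; v3_regnorm
  have hr13 : v2.reg .r13 = Word.low .w32 (v0.reg .rcx) := by rw [hkI.get .r13 rfl]; v3_regnorm
  v3_walk hcode2 hp.call.fetch []
  refine Reach.trans (hparse _ 0x1005ff (v0.reg .rsp - 44) jsA tb js numTokens Parser.init toks r p' toks' ?pre ?r8 hm) ?_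
  case r8 => v3_regnorm; rw [Word.low_idem]; exact hp_rcx
  case pre =>
    have hsp1 : (v0.reg .rsp).toNat - 56 + 8 ≤ (v0.reg .rsp).toNat := by v3_omega
    have hsp2 : (v0.reg .rsp).toNat - 152 ≤ (v0.reg .rsp).toNat - 56 - 96 := by v3_omega
    refine ⟨show CallPre n 0x100000 image_bytes 0x100555 96 0x1005ff _ by v3_callpre himg2 hp.call, by v3_regnorm, by v3_regnorm, by v3_regnorm,
      by v3_regnorm, hnt, hp_jslt, by v3_frame hp_text, by v3_frame hparser2, by show ToksArg Config.default _ _ _ _; v3_frame htoksArg,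
      ⟨⟨by v3_omega, by v3_omega, by run_lit_f; v3_omega, by run_lit_f; v3_omega⟩,
       hp.jsR.callee (by run_lit_f; rw [hsp56]; exact hsp1) (by run_lit_f; rw [hsp56]; exact hsp2),
       htoksR.imp_right fun hR => hR.callee (by run_lit_f; rw [hsp56]; exact hsp1) (by run_lit_f; rw [hsp56]; exact hsp2),
       by v3_omega, by run_lit_f; v3_omega, by run_lit_f; exact hp_jsToks⟩⟩
  intro v4 hpostP
  have hrax := hpostP.rax
  have htoks4 := hpostP.toks
  have hpostP1 := hpostP.ret
  clear hpostP
  v3_open hpostP1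
  have hkP := hpostP1.kept
  v3_viewnorm at hpostP1_rsp hpostP1_same hpostP1_rip
  simp (implicitDefEqProofs := false) only [binFD_useParse, binFD_cfg, dataWins] at hpostP1_same htoks4
  rw [hsp44, hsp56] at hpostP1_same
  have himg4 : CodeAt v4.mem 0x100000 image_bytes := by v3_frame himg2
  have hcode4 := JsmnFD.tjfd_jsmn_run_code himg4
  clear hcodeW
  unfold RetInt at hrax
  v3_walk hcode4 hp.call.fetch [hp_call_retAddr, hp_call_retlt]
  refine Reach.done ⟨⟨by simp, by simp, calleeSaved_of_six (by v3_regnorm) (by v3_regnorm) (by v3_regnorm) (by v3_regnorm)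
    (by v3_regnorm; rw [hkP.get .r14 rfl]; v3_regnorm; rw [hkI.get .r14 rfl]; v3_regnorm)
    (by v3_regnorm; rw [hkP.get .r15 rfl]; v3_regnorm; rw [hkI.get .r15 rfl]; v3_regnorm), ?_⟩, ?_, ?_⟩
  · v3_same
  · unfold RetInt; v3_regnorm; exact hrax
  · v3_memnorm; exact htoks4

/-- **`jsmn_run` of jsmn_d.bin computes `Jsmn.parseFixed` from `Parser.init` (no `Inv.Init`, no fuel).** -/
theorem run_spec (hinit : InitSpec binFD n) (hparse : ParseSpecFixed binFD n) : RunSpecFixed binFD n :=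
  fun _ _ _ _ _ _ _ _ _ _ hp hm => run_reach hinit hparse hp hm

end FD
end J6
end X86
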